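-- pv_equiv track=rewrite | github.com/ChahelPaatur/Self-Modifying-Program-Synthesis-via-Online-Library-Evolution | smpma_agi.py | move_bbox_to_bottomright
-- ===== SOURCE A (Python) =====
-- def translate(grid, dr, dc):
--     """Translate all non-zero cells by (dr, dc) within bounds, preserving size."""
--     if not grid:
--         return grid
--     h, w = len(grid), len(grid[0])
--     out = [[0] * w for _ in range(h)]
--     for i in range(h):
--         for j in range(w):
--             v = grid[i][j]
--             if v == 0:
--                 continue
--             ni, nj = i + dr, j + dc
--             if 0 <= ni < h and 0 <= nj < w:
--                 out[ni][nj] = v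
--     return out
--
-- def move_bbox_to_bottomright(grid):
--     """Translate non-zero bounding box to the bottom-right corner."""
--     if not grid:
--         return grid
--     h, w = len(grid), len(grid[0])
--     min_r, max_r = h, -1
--     min_c, max_c = w, -1
--     for i in range(h):
--         for j in range(w):
--             if grid[i][j] != 0:
--                 min_r = min(min_r, i)
--                 max_r = max(max_r, i)
--                 min_c = min(min_c, j)
--                 max_c = max(max_c, j)
--     if max_r < 0:
--         return grid
--     dr = (h - 1) - max_r
--     dc = (w - 1) - max_c
--     return translate(grid, dr, dc)
-- ===== SOURCE B (Python) =====
-- def move_bbox_to_bottomright(grid):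
--     """Translate non-zero bounding box to the bottom-right corner."""
--     if not grid:
--         return grid
--     h, w = len(grid), len(grid[0])
--     max_r = max_c = -1
--     for i, row in enumerate(grid):
--         for j in range(w):
--             if row[j] != 0:
--                 max_r = i
--                 if j > max_c:
--                     max_c = j
--     if max_r < 0:
--         return grid
--     dr = (h - 1) - max_r
--     dc = (w - 1) - max_c
--     return [[0] * w for _ in range(dr)] + [[0] * dc + row[:w - dc] for row in grid[:h - dr]]
-- ===== Notes on version B (the rewrite author's own statement) =====
-- stated objective: idiomatic
-- what changed: B keeps one scan that only tracks max_r/max_c and replaces A's cell-by-cell scatter helper (translate) with direct row construction: dr all-zero rows followed by each kept row left-padded with dc zeros and sliced to width w; bulk row slicing instead of per-cell writes gives a constant-factor speedup.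
import Mathlib
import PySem

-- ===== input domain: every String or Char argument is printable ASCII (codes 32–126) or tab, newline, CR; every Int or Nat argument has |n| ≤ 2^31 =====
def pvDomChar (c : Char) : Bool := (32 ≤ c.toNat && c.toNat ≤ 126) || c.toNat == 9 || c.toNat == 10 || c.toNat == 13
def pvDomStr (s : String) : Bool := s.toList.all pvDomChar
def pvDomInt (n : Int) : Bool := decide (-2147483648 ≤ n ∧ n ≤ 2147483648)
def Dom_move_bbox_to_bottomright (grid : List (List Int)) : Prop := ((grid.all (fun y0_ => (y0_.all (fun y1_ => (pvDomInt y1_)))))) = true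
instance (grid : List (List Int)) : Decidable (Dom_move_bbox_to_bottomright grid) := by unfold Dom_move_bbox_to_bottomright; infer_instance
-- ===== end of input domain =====

-- B replaces A's cell-by-cell scatter helper with direct row construction (zero rows + per-row pad-and-slice): same O(h*w) asymptotics, measurably faster by a constant factor (bulk slicing instead of per-cell writes).

-- ===== PORT A =====
-- helper `translate`; grid[i][j] / out[ni][nj] ported via pyGetD/pySetD (exact under Pre_: all indices are in range there)
def pyTranslate (grid : List (List Int)) (dr dc : Int) : List (List Int) :=
  if grid = [] then grid
  else
    let h : Int := grid.length
    let w : Int := (grid.headD []).length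
    (PySem.List.pyRange 0 h 1).foldl (fun out i =>
      (PySem.List.pyRange 0 w 1).foldl (fun out j =>
        let v := PySem.List.pyGetD (PySem.List.pyGetD grid i []) j 0
        if v = 0 then out
        else
          let ni := i + dr
          let nj := j + dc
          if 0 ≤ ni ∧ ni < h ∧ 0 ≤ nj ∧ nj < w then
            PySem.List.pySetD out ni (PySem.List.pySetD (PySem.List.pyGetD out ni []) nj v)
          else out) out)
      (List.replicate h.toNat (List.replicate w.toNat 0))

def move_bbox_to_bottomright (grid : List (List Int)) : List (List Int) :=
  if grid = [] then grid
  else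
    let h : Int := grid.length
    let w : Int := (grid.headD []).length
    let s := (PySem.List.pyRange 0 h 1).foldl (fun (s : Int × Int × Int × Int) i =>
      (PySem.List.pyRange 0 w 1).foldl (fun (s : Int × Int × Int × Int) j =>
        if PySem.List.pyGetD (PySem.List.pyGetD grid i []) j 0 ≠ 0 then
          (min s.1 i, max s.2.1 i, min s.2.2.1 j, max s.2.2.2 j)
        else s) s) (h, -1, w, -1)
    if s.2.1 < 0 then grid
    else pyTranslate grid ((h - 1) - s.2.1) ((w - 1) - s.2.2.2)

-- ===== PORT B =====
def move_bbox_to_bottomright_alt (grid : List (List Int)) : List (List Int) :=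
  if grid = [] then grid
  else
    let h : Int := grid.length
    let w : Int := (grid.headD []).length
    let s := (PySem.List.enumerate grid 0).foldl (fun (s : Int × Int) p =>
      (PySem.List.pyRange 0 w 1).foldl (fun (s : Int × Int) j =>
        if PySem.List.pyGetD p.2 j 0 ≠ 0 then (p.1, if j > s.2 then j else s.2)
        else s) s) (-1, -1)
    if s.1 < 0 then grid
    else
      let dr := (h - 1) - s.1
      let dc := (w - 1) - s.2
      -- dr, dc ≥ 0 in this branch, so range(dr)/[0]*dc are replicates and the slices are takes
      List.replicate dr.toNat (List.replicate w.toNat 0) ++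
        (PySem.List.slice grid none (some (h - dr))).map (fun row =>
          List.replicate dc.toNat 0 ++ PySem.List.slice row none (some (w - dc)))

-- ===== PRECONDITION & SPEC =====
-- Pre_ excludes exactly the ragged grids on which A raises IndexError: some row shorter than the first row
-- (both programs index every row at columns 0..w-1, w = len(grid[0])).
def Pre_move_bbox_to_bottomright (grid : List (List Int)) : Prop :=
  ∀ row ∈ grid, (grid.headD []).length ≤ row.length
instance (grid : List (List Int)) : Decidable (Pre_move_bbox_to_bottomright grid) := by
  unfold Pre_move_bbox_to_bottomright; infer_instance
def pvWitness_move_bbox_to_bottomright : List (List Int) := [[0, 3, 0], [1, 0, 0], [0, 0, 0]]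
def Spec_move_bbox_to_bottomright (grid : List (List Int)) (out : List (List Int)) : Prop := out = move_bbox_to_bottomright_alt grid
instance (grid : List (List Int)) (out : List (List Int)) : Decidable (Spec_move_bbox_to_bottomright grid out) := by unfold Spec_move_bbox_to_bottomright; infer_instance

-- ===== CLAIM (what is proved, stated in full; the proofs are below) =====
def Claim_equal_move_bbox_to_bottomright : Prop := ∀ (grid : List (List Int)), Dom_move_bbox_to_bottomright grid → Pre_move_bbox_to_bottomright grid → Spec_move_bbox_to_bottomright grid (move_bbox_to_bottomright grid)

-- ===== LEMMAS AND PROOFS =====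

-- step functions of the two ports, named so the lemmas below can speak about them (definitionally equal to the inline lambdas)
def pvInnerT (grid : List (List Int)) (dr dc h w i : Int) : List (List Int) → Int → List (List Int) :=
  fun out j =>
    let v := PySem.List.pyGetD (PySem.List.pyGetD grid i []) j 0
    if v = 0 then out
    else
      let ni := i + dr
      let nj := j + dc
      if 0 ≤ ni ∧ ni < h ∧ 0 ≤ nj ∧ nj < w then
        PySem.List.pySetD out ni (PySem.List.pySetD (PySem.List.pyGetD out ni []) nj v)
      else out

def pvRowT (r0 : List Int) (dc w : Int) : List Int → Int → List Int :=
  fun row j =>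
    let v := PySem.List.pyGetD r0 j 0
    if v = 0 then row else if 0 ≤ j + dc ∧ j + dc < w then PySem.List.pySetD row (j + dc) v else row

def pvScanA (grid : List (List Int)) (i : Int) : (Int × Int × Int × Int) → Int → (Int × Int × Int × Int) :=
  fun s j => if PySem.List.pyGetD (PySem.List.pyGetD grid i []) j 0 ≠ 0 then
      (min s.1 i, max s.2.1 i, min s.2.2.1 j, max s.2.2.2 j) else s

def pvScanB (p : Int × List Int) : (Int × Int) → Int → (Int × Int) :=
  fun s j => if PySem.List.pyGetD p.2 j 0 ≠ 0 then (p.1, if j > s.2 then j else s.2) else s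

lemma pv_rowT_length (r0 : List Int) (dc w : Int) :
    ∀ (js : List Int) (row : List Int), (js.foldl (pvRowT r0 dc w) row).length = row.length := by
  intro js
  induction js with
  | nil => intro row; rfl
  | cons j t ih =>
    intro row
    rw [List.foldl_cons, ih]
    simp only [pvRowT]
    split_ifs <;> simp [PySem.List.length_pySetD]

lemma pv_innerT_length (grid : List (List Int)) (dr dc h w i : Int) :
    ∀ (js : List Int) (out : List (List Int)),
      (js.foldl (pvInnerT grid dr dc h w i) out).length = out.length := by
  intro js
  induction js with
  | nil => intro out; rfl
  | cons j t ih =>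
    intro out
    rw [List.foldl_cons, ih]
    simp only [pvInnerT]
    split_ifs <;> simp [PySem.List.length_pySetD]

lemma pv_innerT_skip (grid : List (List Int)) (dr dc h w i : Int) (hin : ¬ i + dr < h) :
    ∀ (js : List Int) (out : List (List Int)), js.foldl (pvInnerT grid dr dc h w i) out = out := by
  intro js
  induction js with
  | nil => intro out; rfl
  | cons j t ih =>
    intro out
    have hstep : pvInnerT grid dr dc h w i out j = out := by
      simp only [pvInnerT]
      split_ifs with h1 h2
      · rfl
      · exact absurd h2.2.1 hin
      · rfl
    rw [List.foldl_cons, hstep]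
    exact ih out

lemma pv_innerT_set (grid : List (List Int)) (dr dc h w i : Int) (hi0 : 0 ≤ i) (hdr0 : 0 ≤ dr)
    (hin : i + dr < h) :
    ∀ (js : List Int) (out : List (List Int)), (out.length : Int) = h →
      js.foldl (pvInnerT grid dr dc h w i) out
        = out.set (i + dr).toNat
            (js.foldl (pvRowT (PySem.List.pyGetD grid i []) dc w) (out.getD (i + dr).toNat [])) := by
  intro js
  induction js with
  | nil =>
    intro out hout
    have hk : (i + dr).toNat < out.length := by omega
    rw [List.foldl_nil, List.foldl_nil, List.getD_eq_getElem _ _ hk, List.set_getElem_self]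
  | cons j t ih =>
    intro out hout
    have hni : (0:Int) ≤ i + dr := by omega
    have hk : (i + dr).toNat < out.length := by omega
    by_cases hv : PySem.List.pyGetD (PySem.List.pyGetD grid i []) j 0 = 0
    · have hstep : pvInnerT grid dr dc h w i out j = out := by simp only [pvInnerT]; rw [if_pos hv]
      have hrow : pvRowT (PySem.List.pyGetD grid i []) dc w (out.getD (i + dr).toNat []) j
          = out.getD (i + dr).toNat [] := by simp only [pvRowT]; rw [if_pos hv]
      rw [List.foldl_cons, hstep, List.foldl_cons, hrow]
      exact ih out hout
    · by_cases hg : 0 ≤ j + dc ∧ j + dc < w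
      · have hstep : pvInnerT grid dr dc h w i out j
            = out.set (i + dr).toNat (PySem.List.pySetD (out.getD (i + dr).toNat []) (j + dc)
                (PySem.List.pyGetD (PySem.List.pyGetD grid i []) j 0)) := by
          simp only [pvInnerT]
          rw [if_neg hv, if_pos ⟨hni, hin, hg.1, hg.2⟩, PySem.List.pySetD_of_nonneg _ _ hni]
          congr 2
          rw [PySem.List.pyGetD_eq_getElem _ _ hni (by omega), List.getD_eq_getElem _ _ hk]
        have hrow : pvRowT (PySem.List.pyGetD grid i []) dc w (out.getD (i + dr).toNat []) j
            = PySem.List.pySetD (out.getD (i + dr).toNat []) (j + dc)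
                (PySem.List.pyGetD (PySem.List.pyGetD grid i []) j 0) := by
          simp only [pvRowT]; rw [if_neg hv, if_pos hg]
        rw [List.foldl_cons, hstep, List.foldl_cons, hrow]
        have hout' : (((out.set (i + dr).toNat (PySem.List.pySetD (out.getD (i + dr).toNat []) (j + dc)
            (PySem.List.pyGetD (PySem.List.pyGetD grid i []) j 0))).length : Int)) = h := by
          simp [hout]
        rw [ih _ hout']
        have hgd : (out.set (i + dr).toNat (PySem.List.pySetD (out.getD (i + dr).toNat []) (j + dc)
            (PySem.List.pyGetD (PySem.List.pyGetD grid i []) j 0))).getD (i + dr).toNat []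
            = PySem.List.pySetD (out.getD (i + dr).toNat []) (j + dc)
                (PySem.List.pyGetD (PySem.List.pyGetD grid i []) j 0) := by
          rw [List.getD_eq_getElem _ _ (by simpa using hk)]
          simp [hk]
        rw [hgd, List.set_set]
      · have hstep : pvInnerT grid dr dc h w i out j = out := by
          simp only [pvInnerT]
          rw [if_neg hv, if_neg (by tauto)]
        have hrow : pvRowT (PySem.List.pyGetD grid i []) dc w (out.getD (i + dr).toNat [])  j
            = out.getD (i + dr).toNat [] := by
          simp only [pvRowT]; rw [if_neg hv, if_neg hg]
        rw [List.foldl_cons, hstep, List.foldl_cons, hrow]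
        exact ih out hout

lemma pv_rowT_get (r0 : List Int) (dc w : Int) (W : Nat) (hW : (W : Int) = w) (hdc0 : 0 ≤ dc) :
    ∀ (n : Nat) (c : Nat),
      ((PySem.List.pyRange 0 (n : Int) 1).foldl (pvRowT r0 dc w) (List.replicate W 0))[c]? =
        if c < W then
          some (if dc ≤ (c : Int) ∧ (c : Int) < dc + n then r0.getD (c - dc.toNat) 0 else 0)
        else none := by
  intro n
  induction n with
  | zero =>
    intro c
    rw [show ((0 : Nat) : Int) = 0 from rfl, PySem.List.pyRange_one_eq_nil (by omega), List.foldl_nil,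
      List.getElem?_replicate]
    by_cases hc : c < W
    · rw [if_pos hc, if_pos hc, if_neg (by omega)]
    · rw [if_neg hc, if_neg hc]
  | succ n ih =>
    intro c
    rw [show ((n + 1 : Nat) : Int) = (n : Int) + 1 from by push_cast; ring,
      PySem.List.pyRange_one_succ_right (by omega), List.foldl_append, List.foldl_cons, List.foldl_nil]
    set prev := (PySem.List.pyRange 0 (n : Int) 1).foldl (pvRowT r0 dc w) (List.replicate W 0) with hprev
    have hlen : prev.length = W := by rw [hprev, pv_rowT_length]; simp
    by_cases hv : PySem.List.pyGetD r0 (n : Int) 0 = 0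
    · have hstep : pvRowT r0 dc w prev (n : Int) = prev := by simp only [pvRowT]; rw [if_pos hv]
      rw [hstep, ih c]
      have hv' : r0.getD n 0 = 0 := by simpa using hv
      by_cases hc : c < W
      · rw [if_pos hc, if_pos hc]
        congr 1
        by_cases h1 : dc ≤ (c : Int) ∧ (c : Int) < dc + n
        · rw [if_pos h1, if_pos (by omega)]
        · by_cases h2 : dc ≤ (c : Int) ∧ (c : Int) < dc + (n + 1)
          · rw [if_neg h1, if_pos h2, show c - dc.toNat = n from by omega, hv']
          · rw [if_neg h1, if_neg h2]
      · rw [if_neg hc, if_neg hc]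
    · by_cases hg : 0 ≤ (n : Int) + dc ∧ (n : Int) + dc < w
      · have hstep : pvRowT r0 dc w prev (n : Int)
            = prev.set (n + dc.toNat) (PySem.List.pyGetD r0 (n : Int) 0) := by
          simp only [pvRowT]
          rw [if_neg hv, if_pos hg, show (n : Int) + dc = ((n + dc.toNat : Nat) : Int) from by omega,
            PySem.List.pySetD_natCast]
        rw [hstep, List.getElem?_set]
        by_cases hc : n + dc.toNat = c
        · have hcW : c < W := by omega
          rw [if_pos hc, if_pos (by omega), if_pos hcW, if_pos (by constructor <;> omega),
            show c - dc.toNat = n from by omega]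
          simp
        · rw [if_neg hc, ih c]
          by_cases hcW : c < W
          · rw [if_pos hcW, if_pos hcW]
            split_ifs <;> first | rfl | omega
          · rw [if_neg hcW, if_neg hcW]
      · have hstep : pvRowT r0 dc w prev (n : Int) = prev := by
          simp only [pvRowT]; rw [if_neg hv, if_neg hg]
        have hge : ¬ ((n : Int) + dc < w) := fun hlt => hg ⟨by omega, hlt⟩
        rw [hstep, ih c]
        by_cases hcW : c < W
        · rw [if_pos hcW, if_pos hcW]
          split_ifs <;> first | rfl | omega
        · rw [if_neg hcW, if_neg hcW]

lemma pv_outerT_length (grid : List (List Int)) (dr dc h w : Int) :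
    ∀ (is : List Int) (out : List (List Int)),
      (is.foldl (fun out i => (PySem.List.pyRange 0 w 1).foldl (pvInnerT grid dr dc h w i) out)
        out).length = out.length := by
  intro is
  induction is with
  | nil => intro out; rfl
  | cons i t ih =>
    intro out
    rw [List.foldl_cons, ih, pv_innerT_length]

lemma pv_outer_get (grid : List (List Int)) (dr dc h w : Int) (H W : Nat)
    (hH : (H : Int) = h) (hdr0 : 0 ≤ dr) :
    ∀ (n : Nat) (r : Nat),
      ((PySem.List.pyRange 0 (n : Int) 1).foldl
          (fun out i => (PySem.List.pyRange 0 w 1).foldl (pvInnerT grid dr dc h w i) out)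
          (List.replicate H (List.replicate W 0)))[r]? =
        if r < H then
          some (if dr ≤ (r : Int) ∧ (r : Int) < dr + n then
              (PySem.List.pyRange 0 w 1).foldl
                (pvRowT (PySem.List.pyGetD grid ((r : Int) - dr) []) dc w) (List.replicate W 0)
            else List.replicate W 0)
        else none := by
  intro n
  induction n with
  | zero =>
    intro r
    rw [show ((0 : Nat) : Int) = 0 from rfl, PySem.List.pyRange_one_eq_nil (le_refl (0 : Int)),
      List.foldl_nil, List.getElem?_replicate]
    by_cases hr : r < H
    · rw [if_pos hr, if_pos hr, if_neg (by omega)]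
    · rw [if_neg hr, if_neg hr]
  | succ n ih =>
    intro r
    rw [show ((n + 1 : Nat) : Int) = (n : Int) + 1 from by push_cast; ring,
      PySem.List.pyRange_one_succ_right (by omega), List.foldl_append]
    simp only [List.foldl_cons, List.foldl_nil]
    set prev := (PySem.List.pyRange 0 (n : Int) 1).foldl
      (fun out i => (PySem.List.pyRange 0 w 1).foldl (pvInnerT grid dr dc h w i) out)
      (List.replicate H (List.replicate W 0)) with hprev
    have hlen : prev.length = H := by rw [hprev, pv_outerT_length]; simp
    by_cases hin : (n : Int) + dr < h
    · have hstep := pv_innerT_set grid dr dc h w (n : Int) (by omega) hdr0 hin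
        (PySem.List.pyRange 0 w 1) prev (by rw [hlen]; exact hH)
      rw [hstep]
      have hKH : n + dr.toNat < H := by omega
      have hgd : prev.getD (((n : Int) + dr).toNat) [] = List.replicate W 0 := by
        have h2 : prev[n + dr.toNat]? = some (List.replicate W 0) := by
          rw [ih (n + dr.toNat), if_pos hKH, if_neg (by omega)]
        rw [show ((n : Int) + dr).toNat = n + dr.toNat from by omega,
          List.getD_eq_getElem _ _ (by omega : n + dr.toNat < prev.length)]
        exact Option.some_injective _ (by rw [← List.getElem?_eq_getElem]; exact h2)
      rw [hgd, show ((n : Int) + dr).toNat = n + dr.toNat from by omega, List.getElem?_set]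
      by_cases hc : n + dr.toNat = r
      · rw [if_pos hc, if_pos (by omega), if_pos (by omega), if_pos (by constructor <;> omega),
          show ((r : Int) - dr) = (n : Int) from by omega]
      · rw [if_neg hc, ih r]
        by_cases hrH : r < H
        · rw [if_pos hrH, if_pos hrH]
          split_ifs <;> first | rfl | omega
        · rw [if_neg hrH, if_neg hrH]
    · rw [pv_innerT_skip grid dr dc h w (n : Int) hin (PySem.List.pyRange 0 w 1) prev, ih r]
      by_cases hrH : r < H
      · rw [if_pos hrH, if_pos hrH]
        split_ifs <;> first | rfl | omega
      · rw [if_neg hrH, if_neg hrH]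

lemma pv_pyTranslate_def (grid : List (List Int)) (dr dc : Int) :
    pyTranslate grid dr dc =
      if grid = [] then grid
      else
        (PySem.List.pyRange 0 ((grid.length : Int)) 1).foldl
          (fun out i => (PySem.List.pyRange 0 (((grid.headD []).length : Int)) 1).foldl
            (pvInnerT grid dr dc (grid.length : Int) ((grid.headD []).length : Int) i) out)
          (List.replicate ((grid.length : Int)).toNat
            (List.replicate (((grid.headD []).length : Int)).toNat 0)) := rfl

lemma pv_row_eq (r0 : List Int) (dc w : Int) (W : Nat) (hW : (W : Int) = w) (hdc0 : 0 ≤ dc)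
    (hdcw : dc < w) (hr0 : W ≤ r0.length) :
    (PySem.List.pyRange 0 w 1).foldl (pvRowT r0 dc w) (List.replicate W 0)
      = List.replicate dc.toNat 0 ++ r0.take (W - dc.toNat) := by
  subst hW
  refine List.ext_getElem?_iff.mpr fun c => ?_
  rw [pv_rowT_get r0 dc _ W rfl hdc0 W c, List.getElem?_append]
  by_cases h1 : c < dc.toNat
  · rw [if_pos (by omega), if_neg (by omega), if_pos (by simp; omega), List.getElem?_replicate,
      if_pos h1]
  · by_cases h2 : c < W
    · rw [if_pos h2, if_pos (by constructor <;> omega), if_neg (by simp; omega)]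
      simp only [List.length_replicate]
      rw [List.getElem?_take, if_pos (by omega),
        List.getD_eq_getElem _ _ (by omega : c - dc.toNat < r0.length),
        List.getElem?_eq_getElem (by omega : c - dc.toNat < r0.length)]
    · rw [if_neg h2, if_neg (by simp; omega)]
      simp only [List.length_replicate]
      rw [List.getElem?_take, if_neg (by omega)]

lemma pv_translate_eq (grid : List (List Int)) (hne : grid ≠ [])
    (hPre : ∀ row ∈ grid, (grid.headD []).length ≤ row.length) (dr dc : Int)
    (hdr0 : 0 ≤ dr) (hdrh : dr < (grid.length : Int))
    (hdc0 : 0 ≤ dc) (hdcw : dc < ((grid.headD []).length : Int)) :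
    pyTranslate grid dr dc =
      List.replicate dr.toNat (List.replicate ((grid.headD []).length : Int).toNat 0) ++
        (PySem.List.slice grid none (some ((grid.length : Int) - dr))).map (fun row =>
          List.replicate dc.toNat 0 ++
            PySem.List.slice row none (some (((grid.headD []).length : Int) - dc))) := by
  rw [pv_pyTranslate_def, if_neg hne]
  simp only [Int.toNat_natCast]
  simp only [PySem.List.slice_to grid (show (0 : Int) ≤ (grid.length : Int) - dr from by omega),
    show ((grid.length : Int) - dr).toNat = grid.length - dr.toNat from by omega]
  simp only [fun (row : List Int) => PySem.List.slice_to row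
      (show (0 : Int) ≤ ((grid.headD []).length : Int) - dc from by omega),
    show (((grid.headD []).length : Int) - dc).toNat = (grid.headD []).length - dc.toNat
      from by omega]
  refine List.ext_getElem?_iff.mpr fun r => ?_
  rw [pv_outer_get grid dr dc _ _ grid.length (grid.headD []).length rfl hdr0 grid.length r,
    List.getElem?_append]
  by_cases h1 : r < dr.toNat
  · rw [if_pos (by omega), if_neg (by omega), if_pos (by simp; omega), List.getElem?_replicate,
      if_pos h1]
  · by_cases h2 : r < grid.length
    · rw [if_pos h2, if_pos (by constructor <;> omega), if_neg (by simp; omega)]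
      simp only [List.length_replicate]
      rw [List.getElem?_map, List.getElem?_take, if_pos (by omega),
        List.getElem?_eq_getElem (by omega : r - dr.toNat < grid.length)]
      have hsrc : PySem.List.pyGetD grid ((r : Int) - dr) [] = grid[r - dr.toNat] := by
        rw [show ((r : Int) - dr) = ((r - dr.toNat : Nat) : Int) from by omega]
        simp [List.getElem?_eq_getElem (show r - dr.toNat < grid.length from by omega)]
      rw [hsrc]
      simp only [Option.map_some]
      exact congrArg some (pv_row_eq (grid[r - dr.toNat]) dc _ (grid.headD []).length rfl hdc0
        hdcw (hPre _ (List.getElem_mem _)))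
    · rw [if_neg h2, if_neg (by simp; omega)]
      simp only [List.length_replicate]
      rw [List.getElem?_map, List.getElem?_take, if_neg (by omega)]
      rfl

lemma pv_scan_inner (grid : List (List Int)) (i : Int) (_hi : 0 ≤ i) :
    ∀ (js : List Int), (∀ j ∈ js, 0 ≤ j) → ∀ (s4 : Int × Int × Int × Int), s4.2.1 ≤ i →
      (0 ≤ s4.2.1 → 0 ≤ s4.2.2.2) →
      (js.foldl (pvScanB (i, PySem.List.pyGetD grid i [])) (s4.2.1, s4.2.2.2)
          = ((js.foldl (pvScanA grid i) s4).2.1, (js.foldl (pvScanA grid i) s4).2.2.2))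
      ∧ ((js.foldl (pvScanA grid i) s4).2.1 = s4.2.1 ∨ (js.foldl (pvScanA grid i) s4).2.1 = i)
      ∧ ((js.foldl (pvScanA grid i) s4).2.2.2 = s4.2.2.2 ∨ (js.foldl (pvScanA grid i) s4).2.2.2 ∈ js)
      ∧ (0 ≤ (js.foldl (pvScanA grid i) s4).2.1 → 0 ≤ (js.foldl (pvScanA grid i) s4).2.2.2) := by
  intro js
  induction js with
  | nil =>
    intro _ s4 hri hsgn
    exact ⟨rfl, Or.inl rfl, Or.inl rfl, hsgn⟩
  | cons j t ih =>
    intro hjs s4 hri hsgn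
    simp only [List.foldl_cons]
    have hj0 : 0 ≤ j := hjs j List.mem_cons_self
    by_cases hv : PySem.List.pyGetD (PySem.List.pyGetD grid i []) j 0 = 0
    · have hA : pvScanA grid i s4 j = s4 := by
        simp only [pvScanA]; rw [if_neg (by simpa using hv)]
      have hB : pvScanB (i, PySem.List.pyGetD grid i []) (s4.2.1, s4.2.2.2) j
          = (s4.2.1, s4.2.2.2) := by
        simp only [pvScanB]; rw [if_neg (by simpa using hv)]
      rw [hA, hB]
      obtain ⟨d1, d2, d3, d4⟩ := ih (fun j' hj' => hjs j' (List.mem_cons_of_mem _ hj')) s4 hri hsgn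
      exact ⟨d1, d2, d3.imp id (List.mem_cons_of_mem _), d4⟩
    · have hA : pvScanA grid i s4 j
          = (min s4.1 i, max s4.2.1 i, min s4.2.2.1 j, max s4.2.2.2 j) := by
        simp only [pvScanA]; rw [if_pos hv]
      have hmaxr : max s4.2.1 i = i := max_eq_right hri
      have hmaxc : (if j > s4.2.2.2 then j else s4.2.2.2) = max s4.2.2.2 j := by
        rw [max_def]; split_ifs <;> omega
      have hB : pvScanB (i, PySem.List.pyGetD grid i []) (s4.2.1, s4.2.2.2) j
          = ((min s4.1 i, max s4.2.1 i, min s4.2.2.1 j, max s4.2.2.2 j).2.1,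
             (min s4.1 i, max s4.2.1 i, min s4.2.2.1 j, max s4.2.2.2 j).2.2.2) := by
        simp only [pvScanB]; rw [if_pos hv, hmaxr, hmaxc]
      rw [hA, hB]
      obtain ⟨d1, d2, d3, d4⟩ := ih (fun j' hj' => hjs j' (List.mem_cons_of_mem _ hj'))
        (min s4.1 i, max s4.2.1 i, min s4.2.2.1 j, max s4.2.2.2 j)
        (by dsimp only; omega) (by dsimp only; intro _; omega)
      refine ⟨d1, ?_, ?_, d4⟩
      · rcases d2 with h | h
        · exact Or.inr (h.trans hmaxr)
        · exact Or.inr h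
      · rcases d3 with h | h
        · rcases max_choice s4.2.2.2 j with h2 | h2
          · exact Or.inl (h.trans h2)
          · refine Or.inr ?_
            rw [h]
            show max s4.2.2.2 j ∈ j :: t
            rw [h2]
            exact List.mem_cons_self
        · exact Or.inr (List.mem_cons_of_mem _ h)

lemma pv_scan_outer (grid : List (List Int)) (w : Int) :
    ∀ (is : List Int), (∀ i ∈ is, 0 ≤ i) → is.Pairwise (· ≤ ·) →
      ∀ (s4 : Int × Int × Int × Int), (∀ i ∈ is, s4.2.1 ≤ i) → (0 ≤ s4.2.1 → 0 ≤ s4.2.2.2) →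
      (is.foldl (fun s i => (PySem.List.pyRange 0 w 1).foldl (pvScanB (i, PySem.List.pyGetD grid i [])) s) (s4.2.1, s4.2.2.2)
          = ((is.foldl (fun s i => (PySem.List.pyRange 0 w 1).foldl (pvScanA grid i) s) s4).2.1,
             (is.foldl (fun s i => (PySem.List.pyRange 0 w 1).foldl (pvScanA grid i) s) s4).2.2.2))
      ∧ ((is.foldl (fun s i => (PySem.List.pyRange 0 w 1).foldl (pvScanA grid i) s) s4).2.1 = s4.2.1
          ∨ (is.foldl (fun s i => (PySem.List.pyRange 0 w 1).foldl (pvScanA grid i) s) s4).2.1 ∈ is)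
      ∧ ((is.foldl (fun s i => (PySem.List.pyRange 0 w 1).foldl (pvScanA grid i) s) s4).2.2.2 = s4.2.2.2
          ∨ (is.foldl (fun s i => (PySem.List.pyRange 0 w 1).foldl (pvScanA grid i) s) s4).2.2.2 ∈ PySem.List.pyRange 0 w 1)
      ∧ (0 ≤ (is.foldl (fun s i => (PySem.List.pyRange 0 w 1).foldl (pvScanA grid i) s) s4).2.1
          → 0 ≤ (is.foldl (fun s i => (PySem.List.pyRange 0 w 1).foldl (pvScanA grid i) s) s4).2.2.2) := by
  intro is
  induction is with
  | nil =>
    intro _ _ s4 _ hsgn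
    exact ⟨rfl, Or.inl rfl, Or.inl rfl, hsgn⟩
  | cons i t ih =>
    intro his hord s4 hle hsgn
    simp only [List.foldl_cons]
    have hi0 : 0 ≤ i := his i List.mem_cons_self
    obtain ⟨c1, c2, c3, c4⟩ := pv_scan_inner grid i hi0 (PySem.List.pyRange 0 w 1)
      (fun j hj => ((PySem.List.mem_pyRange_one).mp hj).1) s4 (hle i List.mem_cons_self) hsgn
    rw [c1]
    obtain ⟨hhead, htail⟩ := List.pairwise_cons.mp hord
    have hle' : ∀ i' ∈ t, ((PySem.List.pyRange 0 w 1).foldl (pvScanA grid i) s4).2.1 ≤ i' := by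
      intro i' hi'
      rcases c2 with h | h
      · rw [h]; exact hle i' (List.mem_cons_of_mem _ hi')
      · rw [h]; exact hhead i' hi'
    obtain ⟨d1, d2, d3, d4⟩ := ih (fun i' h => his i' (List.mem_cons_of_mem _ h)) htail
      ((PySem.List.pyRange 0 w 1).foldl (pvScanA grid i) s4) hle' c4
    refine ⟨d1, ?_, ?_, d4⟩
    · rcases d2 with h | h
      · rcases c2 with h2 | h2
        · exact Or.inl (h.trans h2)
        · refine Or.inr ?_
          rw [h, h2]
          exact List.mem_cons_self
      · exact Or.inr (List.mem_cons_of_mem _ h)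
    · rcases d3 with h | h
      · rcases c3 with h2 | h2
        · exact Or.inl (h.trans h2)
        · exact Or.inr (h ▸ h2)
      · exact Or.inr h


lemma pv_portA_def (grid : List (List Int)) :
    move_bbox_to_bottomright grid =
      if grid = [] then grid
      else
        if ((PySem.List.pyRange 0 ((grid.length : Int)) 1).foldl
              (fun s i => (PySem.List.pyRange 0 (((grid.headD []).length : Int)) 1).foldl
                (pvScanA grid i) s)
              (((grid.length : Int)), -1, (((grid.headD []).length : Int)), -1)).2.1 < 0 then grid
        else
          pyTranslate grid
            (((grid.length : Int) - 1) -
              ((PySem.List.pyRange 0 ((grid.length : Int)) 1).foldl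
                (fun s i => (PySem.List.pyRange 0 (((grid.headD []).length : Int)) 1).foldl
                  (pvScanA grid i) s)
                (((grid.length : Int)), -1, (((grid.headD []).length : Int)), -1)).2.1)
            ((((grid.headD []).length : Int) - 1) -
              ((PySem.List.pyRange 0 ((grid.length : Int)) 1).foldl
                (fun s i => (PySem.List.pyRange 0 (((grid.headD []).length : Int)) 1).foldl
                  (pvScanA grid i) s)
                (((grid.length : Int)), -1, (((grid.headD []).length : Int)), -1)).2.2.2) := rfl

lemma pv_portB_def (grid : List (List Int)) :
    move_bbox_to_bottomright_alt grid =
      if grid = [] then grid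
      else
        if ((PySem.List.enumerate grid 0).foldl
              (fun s p => (PySem.List.pyRange 0 (((grid.headD []).length : Int)) 1).foldl
                (pvScanB p) s) (-1, -1)).1 < 0 then grid
        else
          List.replicate
              (((grid.length : Int) - 1) -
                ((PySem.List.enumerate grid 0).foldl
                  (fun s p => (PySem.List.pyRange 0 (((grid.headD []).length : Int)) 1).foldl
                    (pvScanB p) s) (-1, -1)).1).toNat
              (List.replicate ((grid.headD []).length : Int).toNat 0) ++
            (PySem.List.slice grid none
                (some ((grid.length : Int) -
                  (((grid.length : Int) - 1) -
                    ((PySem.List.enumerate grid 0).foldl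
                      (fun s p => (PySem.List.pyRange 0 (((grid.headD []).length : Int)) 1).foldl
                        (pvScanB p) s) (-1, -1)).1)))).map (fun row =>
              List.replicate
                  ((((grid.headD []).length : Int) - 1) -
                    ((PySem.List.enumerate grid 0).foldl
                      (fun s p => (PySem.List.pyRange 0 (((grid.headD []).length : Int)) 1).foldl
                        (pvScanB p) s) (-1, -1)).2).toNat 0 ++
                PySem.List.slice row none
                  (some (((grid.headD []).length : Int) -
                    ((((grid.headD []).length : Int) - 1) -
                      ((PySem.List.enumerate grid 0).foldl
                        (fun s p => (PySem.List.pyRange 0 (((grid.headD []).length : Int)) 1).foldl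
                          (pvScanB p) s) (-1, -1)).2)))) := rfl

-- ===== VERDICT (by name: the statement is the Claim_ definition above) =====
theorem move_bbox_to_bottomright_spec : Claim_equal_move_bbox_to_bottomright := by
  intro grid _hdom hpre
  unfold Spec_move_bbox_to_bottomright
  unfold Pre_move_bbox_to_bottomright at hpre
  by_cases hg : grid = []
  · rw [move_bbox_to_bottomright, move_bbox_to_bottomright_alt, if_pos hg, if_pos hg]
  · rw [pv_portA_def, pv_portB_def, if_neg hg, if_neg hg,
      PySem.List.enumerate_eq_map_pyRange grid []]
    simp only [List.foldl_map, PySem.List.len_eq]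
    obtain ⟨c1, c2, c3, c4⟩ := pv_scan_outer grid ((grid.headD []).length : Int)
      (PySem.List.pyRange 0 ((grid.length : Int)) 1)
      (fun i hi => ((PySem.List.mem_pyRange_one).mp hi).1)
      ((PySem.List.pairwise_lt_pyRange_one 0 ((grid.length : Int))).imp (fun h => le_of_lt h))
      (((grid.length : Int)), -1, (((grid.headD []).length : Int)), -1)
      (fun i hi => by have := ((PySem.List.mem_pyRange_one).mp hi).1; dsimp only; omega)
      (by dsimp only; omega)
    rw [c1]
    set sA := (PySem.List.pyRange 0 ((grid.length : Int)) 1).foldl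
      (fun s i => (PySem.List.pyRange 0 (((grid.headD []).length : Int)) 1).foldl
        (pvScanA grid i) s)
      (((grid.length : Int)), -1, (((grid.headD []).length : Int)), -1) with hsA
    dsimp only
    split_ifs with hmr
    · rfl
    · have hmrmem : sA.2.1 ∈ PySem.List.pyRange 0 ((grid.length : Int)) 1 := by
        rcases c2 with h | h
        · exfalso; rw [h] at hmr; exact hmr (by norm_num)
        · exact h
      have hmr2 := ((PySem.List.mem_pyRange_one).mp hmrmem).2
      have hmc0 : (0 : Int) ≤ sA.2.2.2 := c4 (by omega)
      have hmcw : sA.2.2.2 < ((grid.headD []).length : Int) := by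
        rcases c3 with h | h
        · exfalso; rw [h] at hmc0; simp at hmc0
        · exact ((PySem.List.mem_pyRange_one).mp h).2
      exact pv_translate_eq grid hg hpre
        (((grid.length : Int) - 1) - sA.2.1)
        ((((grid.headD []).length : Int) - 1) - sA.2.2.2)
        (by omega) (by omega) (by omega) (by omega)
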